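-- pv_equiv track=rewrite | github.com/dirtysalt/codes | misc/leetcode/x-of-a-kind-in-a-deck-of-cards.py | hasGroupsSizeX
-- ===== SOURCE A (Python) =====
-- from collections import Counter
--
-- def hasGroupsSizeX(deck):
--     """
--     :type deck: List[int]
--     :rtype: bool
--     """
--
--     def gcd(a, b):
--         while True:
--             c = a % b
--             if c == 0:
--                 return b
--             a, b = b, c
--
--     counter = Counter()
--     ans = len(deck)
--     for x in deck:
--         counter[x] += 1
--     for v in counter.values():
--         ans = gcd(ans, v)
--     return ans >= 2
-- ===== SOURCE B (Python) =====
-- from collections import Counter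
--
-- def hasGroupsSizeX(deck):
--     counts = list(Counter(deck).values())
--     m = min(counts, default=0)
--     for x in range(2, m + 1):
--         if all(c % x == 0 for c in counts):
--             return True
--     return False
-- ===== Notes on version B (the rewrite author's own statement) =====
-- stated objective: alternative
-- what changed: Replaces A's gcd-folding over the counter values (with an inner Euclidean while-loop) by a direct trial-divisor search: try every candidate pile size X from 2 up to the minimum count and test whether X divides all counts.
import Mathlib
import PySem

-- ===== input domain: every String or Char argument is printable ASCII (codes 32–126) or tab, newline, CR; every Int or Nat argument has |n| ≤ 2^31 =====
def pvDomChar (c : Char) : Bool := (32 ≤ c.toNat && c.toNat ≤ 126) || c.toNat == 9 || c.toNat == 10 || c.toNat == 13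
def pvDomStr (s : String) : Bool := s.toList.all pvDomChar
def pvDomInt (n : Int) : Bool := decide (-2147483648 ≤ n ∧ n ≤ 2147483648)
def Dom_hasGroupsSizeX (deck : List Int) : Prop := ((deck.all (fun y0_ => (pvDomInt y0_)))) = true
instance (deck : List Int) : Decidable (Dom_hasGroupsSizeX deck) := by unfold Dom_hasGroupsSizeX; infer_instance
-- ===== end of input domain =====

-- B replaces A's gcd-folding reduction by a direct trial-divisor search over candidate
-- pile sizes 2..min(count) (objective: alternative decomposition, similar cost).

-- ===== PORT A =====
-- A's inner 'def gcd(a, b)' while-loop; b ≤ 0 is never reached by A (counter values are ≥ 1),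
-- there the Lean function returns 0 (Python would raise ZeroDivisionError on b = 0).
def pyGcd (a b : Int) : Int :=
  if hb : 0 < b then
    let c := PySem.Int.mod a b
    if c = 0 then b else pyGcd b c
  else 0
termination_by b.toNat
decreasing_by
  have h1 := PySem.Int.mod_lt a hb
  omega

def hasGroupsSizeX (deck : List Int) : Bool :=
  let counter := deck.foldl (fun d x => d.modify x 0 (· + 1)) PySem.Dict.empty
  let ans := counter.values.foldl (fun a v => pyGcd a v) (deck.length : Int)
  decide (2 ≤ ans)

-- ===== PORT B =====
def hasGroupsSizeX_alt (deck : List Int) : Bool :=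
  let counts := (PySem.Dict.counter deck).values
  let m := PySem.List.minD counts (fun c => c) 0
  (PySem.List.pyRange 2 (m + 1) 1).any
    (fun x => counts.all (fun c => PySem.Int.mod c x == 0))

-- ===== PRECONDITION & SPEC =====
def Spec_hasGroupsSizeX (deck : List Int) (out : Bool) : Prop := out = hasGroupsSizeX_alt deck
instance (deck : List Int) (out : Bool) : Decidable (Spec_hasGroupsSizeX deck out) := by unfold Spec_hasGroupsSizeX; infer_instance

-- ===== CLAIM (what is proved, stated in full; the proofs are below) =====
def Claim_equal_hasGroupsSizeX : Prop := ∀ (deck : List Int), Dom_hasGroupsSizeX deck → Spec_hasGroupsSizeX deck (hasGroupsSizeX deck)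

-- ===== LEMMAS AND PROOFS =====

-- pyGcd is a common divisor
theorem pyGcd_dvd (a b : Int) (hb : 0 < b) :
    pyGcd a b ∣ a ∧ pyGcd a b ∣ b ∧ 0 < pyGcd a b := by
  rw [pyGcd]
  simp only [hb, dif_pos]
  by_cases hc : PySem.Int.mod a b = 0
  · rw [if_pos hc]
    have : b ∣ a := (PySem.Int.mod_eq_zero_iff_dvd a b).1 hc
    exact ⟨this, dvd_refl b, hb⟩
  · rw [if_neg hc]
    have hcpos : 0 < PySem.Int.mod a b := by
      have := PySem.Int.mod_nonneg a hb; omega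
    have ih := pyGcd_dvd b (PySem.Int.mod a b) hcpos
    refine ⟨?_, ih.1, ih.2.2⟩
    have hm : PySem.Int.mod a b = a % b := PySem.Int.mod_eq_emod_of_pos hb
    have ha' : b * (a / b) + PySem.Int.mod a b = a := by
      rw [hm, Int.emod_def]; ring
    have hdvd : pyGcd b (PySem.Int.mod a b) ∣ b * (a / b) + PySem.Int.mod a b :=
      dvd_add (Dvd.dvd.mul_right ih.1 _) ih.2.1
    rwa [ha'] at hdvd
termination_by b.toNat
decreasing_by
  have h1 := PySem.Int.mod_lt a hb
  omega

-- any common divisor divides pyGcd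
theorem dvd_pyGcd (a b d : Int) (hb : 0 < b) (hda : d ∣ a) (hdb : d ∣ b) :
    d ∣ pyGcd a b := by
  rw [pyGcd]
  simp only [hb, dif_pos]
  by_cases hc : PySem.Int.mod a b = 0
  · rw [if_pos hc]; exact hdb
  · rw [if_neg hc]
    have hcpos : 0 < PySem.Int.mod a b := by
      have := PySem.Int.mod_nonneg a hb; omega
    have hm : PySem.Int.mod a b = a % b := PySem.Int.mod_eq_emod_of_pos hb
    have hdc : d ∣ PySem.Int.mod a b := by
      rw [hm]
      rw [Int.emod_def]
      exact dvd_sub hda (Dvd.dvd.mul_right hdb _)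
    exact dvd_pyGcd b (PySem.Int.mod a b) d hcpos hdb hdc
termination_by b.toNat
decreasing_by
  have h1 := PySem.Int.mod_lt a hb
  omega

-- the gcd fold: divides the seed and every element
theorem foldl_pyGcd_dvd (l : List Int) (a : Int) (ha : 0 ≤ a) (hl : ∀ c ∈ l, 0 < c) :
    (l.foldl (fun a v => pyGcd a v) a ∣ a ∧ ∀ c ∈ l, l.foldl (fun a v => pyGcd a v) a ∣ c)
      ∧ 0 ≤ l.foldl (fun a v => pyGcd a v) a := by
  induction l generalizing a with
  | nil => exact ⟨⟨dvd_refl a, by simp⟩, ha⟩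
  | cons c t ih =>
    have hc : 0 < c := hl c (by simp)
    have hg := pyGcd_dvd a c hc
    have iht := ih (pyGcd a c) (le_of_lt hg.2.2) (fun x hx => hl x (by simp [hx]))
    refine ⟨⟨dvd_trans iht.1.1 hg.1, ?_⟩, iht.2⟩
    intro x hx
    rcases List.mem_cons.1 hx with h | h
    · subst h; exact dvd_trans iht.1.1 hg.2.1
    · exact iht.1.2 x h

theorem dvd_foldl_pyGcd (l : List Int) (a d : Int) (hl : ∀ c ∈ l, 0 < c)
    (hda : d ∣ a) (hdl : ∀ c ∈ l, d ∣ c) :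
    d ∣ l.foldl (fun a v => pyGcd a v) a := by
  induction l generalizing a with
  | nil => exact hda
  | cons c t ih =>
    exact ih (pyGcd a c) (fun x hx => hl x (by simp [hx]))
      (dvd_pyGcd a c d (hl c (by simp)) hda (hdl c (by simp)))
      (fun x hx => hdl x (by simp [hx]))

-- the counter's value list, explicitly
theorem counts_eq (deck : List Int) :
    (PySem.Dict.counter deck).values
      = (PySem.Set.ofList deck).map (fun k => (deck.count k : Int)) := by
  simp [PySem.Dict.values, PySem.Dict.items_counter, List.map_map, Function.comp]

theorem sum_counts (deck : List Int) :
    ((PySem.Set.ofList deck).map (fun k => (deck.count k : Int))).sum = (deck.length : Int) := by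
  have hperm : (PySem.Set.ofList deck).Perm deck.dedup := by
    rw [List.perm_ext_iff_of_nodup (PySem.Set.nodup_ofList deck) deck.nodup_dedup]
    intro a
    rw [PySem.Set.mem_ofList, List.mem_dedup]
  have h1 : ((PySem.Set.ofList deck).map (fun k => (deck.count k : Int))).sum
      = ((deck.dedup).map (fun k => (deck.count k : Int))).sum :=
    List.Perm.sum_eq (hperm.map _)
  rw [h1]
  have h2 := List.sum_map_count_dedup_eq_length deck
  have := congrArg (fun n : Nat => (n : Int)) h2
  simpa [List.map_map, Function.comp] using this

-- ===== VERDICT (by name: the statement is the Claim_ definition above) =====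
theorem hasGroupsSizeX_spec : Claim_equal_hasGroupsSizeX := by
  intro deck _
  unfold Spec_hasGroupsSizeX hasGroupsSizeX hasGroupsSizeX_alt
  rw [← PySem.Dict.counter_eq_foldl]
  set counts := (PySem.Dict.counter deck).values with hcounts
  have hce : counts = (PySem.Set.ofList deck).map (fun k => (deck.count k : Int)) :=
    counts_eq deck
  have hpos : ∀ c ∈ counts, 0 < c := by
    intro c hc
    rw [hce] at hc
    obtain ⟨k, hk, rfl⟩ := List.mem_map.1 hc
    have : k ∈ deck := (PySem.Set.mem_ofList deck k).1 hk
    exact_mod_cast List.count_pos_iff.2 this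
  have hsum : counts.sum = (deck.length : Int) := by rw [hce]; exact sum_counts deck
  set g := counts.foldl (fun a v => pyGcd a v) (deck.length : Int) with hg
  have hfold := foldl_pyGcd_dvd counts (deck.length : Int) (by positivity) hpos
  -- the two boolean sides
  cases hdeck : deck with
  | nil => subst hdeck; decide
  | cons d0 t =>
    have hne : counts ≠ [] := by
      rw [hce]
      intro h
      have hm := (PySem.Set.mem_ofList deck d0).2 (by rw [hdeck]; simp)
      rw [List.map_eq_nil_iff.1 h] at hm
      simp at hm
    rw [← hdeck]
    obtain ⟨c0, hc0⟩ := List.exists_mem_of_ne_nil counts hne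
    have hgpos : 0 < g := by
      have h1 : g ∣ c0 := hfold.1.2 c0 hc0
      have h2 : 0 < c0 := hpos c0 hc0
      have h3 : 0 ≤ g := hfold.2
      rcases h3.lt_or_eq with h | h
      · exact h
      · exfalso; rw [← h] at h1; simp at h1; omega
    -- min element
    obtain ⟨mv, hmv⟩ : ∃ mv, PySem.List.min? counts (fun c => c) = some mv := by
      cases hh : PySem.List.min? counts (fun c => c) with
      | none => exact absurd ((PySem.List.min?_eq_none_iff counts (fun c => c)).1 hh) hne
      | some m => exact ⟨m, rfl⟩
    have hmmem : mv ∈ counts := PySem.List.min?_mem hmv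
    have hmin : ∀ y ∈ counts, mv ≤ y := PySem.List.min?_isMin hmv
    simp only [PySem.List.minD, hmv, Option.getD_some]
    -- equivalence of the two decisions
    rcases hA : decide (2 ≤ g) with _ | _
    · -- A false: 2 ≤ g fails; show no x in 2..mv works
      simp only [decide_eq_false_iff_not, not_le] at hA
      symm
      rw [List.any_eq_false]
      intro x hx
      rw [PySem.List.mem_pyRange_one] at hx
      simp only [List.all_eq_true, beq_iff_eq]
      intro hall
      have hxdvd : ∀ c ∈ counts, x ∣ c := fun c hc =>
        (PySem.Int.mod_eq_zero_iff_dvd c x).1 (hall c hc)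
      have hxn : x ∣ (deck.length : Int) := by
        rw [← hsum]; exact List.dvd_sum hxdvd
      have : x ∣ g := dvd_foldl_pyGcd counts (deck.length : Int) x hpos hxn hxdvd
      have : x ≤ g := Int.le_of_dvd hgpos this
      omega
    · -- A true: 2 ≤ g; x = g works
      simp only [decide_eq_true_eq] at hA
      symm
      rw [List.any_eq_true]
      refine ⟨g, ?_, ?_⟩
      · rw [PySem.List.mem_pyRange_one]
        have : g ≤ mv := Int.le_of_dvd (hpos mv hmmem) (hfold.1.2 mv hmmem)
        omega
      · rw [List.all_eq_true]
        intro c hc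
        rw [beq_iff_eq]
        exact (PySem.Int.mod_eq_zero_iff_dvd c g).2 (hfold.1.2 c hc)
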